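-- pv_equiv track=rewrite | github.com/sjogleka/General_codes | new_2.py | duplicatesOnSegment_1
-- ===== SOURCE A (Python) =====
-- from collections import Counter,defaultdict
--
-- def duplicatesOnSegment_1(arr):
--     count = 0
--     for i in range(len(arr)):
--         n = i+1
--         while n <= len(arr):
--             sub = Counter(arr[i:n])
--             flag = True
--             for element in sub.values():
--                 if element<2:
--                     flag = False
--                     break
--             if flag:
--                 count+=1
--             n += 1
--
--     return count
-- ===== SOURCE B (Python) =====
-- def duplicatesOnSegment_1(arr):
--     total = 0
--     L = len(arr)
--     for i in range(L):
--         cnt = {}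
--         singles = 0
--         for j in range(i, L):
--             x = arr[j]
--             c = cnt.get(x, 0) + 1
--             cnt[x] = c
--             if c == 1:
--                 singles += 1
--             elif c == 2:
--                 singles -= 1
--             if singles == 0:
--                 total += 1
--     return total
-- ===== Notes on version B (the rewrite author's own statement) =====
-- stated objective: faster
-- what changed: Instead of rebuilding a Counter of every slice and scanning its values (O(n^3)), B fixes the start index and extends the subarray one element at a time, maintaining a count dict and the number of elements currently occurring exactly once; a subarray is counted exactly when that number is zero.
import Mathlib
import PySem

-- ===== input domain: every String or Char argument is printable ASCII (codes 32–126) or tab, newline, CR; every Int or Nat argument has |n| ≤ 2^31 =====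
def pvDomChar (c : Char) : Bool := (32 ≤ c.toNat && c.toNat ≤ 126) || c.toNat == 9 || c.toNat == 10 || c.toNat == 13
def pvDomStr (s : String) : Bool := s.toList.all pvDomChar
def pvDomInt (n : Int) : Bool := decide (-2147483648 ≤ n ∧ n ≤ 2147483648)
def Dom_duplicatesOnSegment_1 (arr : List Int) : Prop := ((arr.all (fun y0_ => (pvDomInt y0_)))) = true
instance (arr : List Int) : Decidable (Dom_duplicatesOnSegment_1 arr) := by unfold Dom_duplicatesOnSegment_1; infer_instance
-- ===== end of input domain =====

-- B replaces A's per-slice Counter rebuild by a per-start incremental count dict tracking how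
-- many elements occur exactly once (measured faster); equal return value proved for all inputs.

-- ===== PORT A =====
def duplicatesOnSegment_1 (arr : List Int) : Int :=
  (PySem.List.pyRange 0 (arr.length : Int) 1).foldl (fun count i =>
    -- 'n = i+1; while n <= len(arr): …; n += 1' visits exactly n ∈ range(i+1, len(arr)+1)
    (PySem.List.pyRange (i + 1) ((arr.length : Int) + 1) 1).foldl (fun count n =>
      let sub := PySem.Dict.counter (PySem.List.slice arr (some i) (some n))
      -- 'for element in sub.values(): if element < 2: flag = False; break' computes: all values ≥ 2
      let flag := sub.values.all (fun element => !(element < 2))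
      if flag then count + 1 else count) count) 0

-- ===== PORT B =====
def duplicatesOnSegment_1_alt (arr : List Int) : Int :=
  (PySem.List.pyRange 0 (arr.length : Int) 1).foldl (fun total i =>
    ((PySem.List.pyRange i (arr.length : Int) 1).foldl
      (fun (st : Int × PySem.Dict Int Int × Int) j =>
        let x := PySem.List.pyGetD arr j 0   -- arr[j]; j is always in range here
        let c := st.2.1.getD x 0 + 1
        let cnt := st.2.1.insert x c
        let singles := if c = 1 then st.2.2 + 1 else if c = 2 then st.2.2 - 1 else st.2.2
        let total := if singles = 0 then st.1 + 1 else st.1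
        (total, cnt, singles))
      (total, PySem.Dict.empty, 0)).1) 0

-- ===== PRECONDITION & SPEC =====
def Spec_duplicatesOnSegment_1 (arr : List Int) (out : Int) : Prop := out = duplicatesOnSegment_1_alt arr
instance (arr : List Int) (out : Int) : Decidable (Spec_duplicatesOnSegment_1 arr out) := by unfold Spec_duplicatesOnSegment_1; infer_instance

-- ===== CLAIM (what is proved, stated in full; the proofs are below) =====
def Claim_equal_duplicatesOnSegment_1 : Prop := ∀ (arr : List Int), Dom_duplicatesOnSegment_1 arr → Spec_duplicatesOnSegment_1 arr (duplicatesOnSegment_1 arr)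

-- ===== LEMMAS AND PROOFS =====

-- q is "good" iff every element of q occurs at least twice in q (A's flag for the slice q)
def goodb (q : List Int) : Bool := decide (∀ x ∈ q, 2 ≤ q.count x)

-- number of distinct elements of q occurring exactly once (B's 'singles' after reading q)
def singlesOf (q : List Int) : ℤ :=
  ((q.toFinset.filter (fun x => q.count x = 1)).card : ℤ)

-- number of nonempty prefixes pfx of 'rest' with p ++ pfx good
def countGood : List Int → List Int → Int
  | _, [] => 0
  | p, x :: rest => (if goodb (p ++ [x]) then (1 : Int) else 0) + countGood (p ++ [x]) rest

-- B's inner-loop body as a named function (definitionally the lambda in the port of B)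
def bstep (st : Int × PySem.Dict Int Int × Int) (x : Int) : Int × PySem.Dict Int Int × Int :=
  let c := st.2.1.getD x 0 + 1
  let cnt := st.2.1.insert x c
  let singles := if c = 1 then st.2.2 + 1 else if c = 2 then st.2.2 - 1 else st.2.2
  let total := if singles = 0 then st.1 + 1 else st.1
  (total, cnt, singles)

lemma goodA_eq_goodb (q : List Int) :
    (PySem.Dict.counter q).values.all (fun element => !(element < 2)) = goodb q := by
  rw [PySem.Dict.values_eq_map_keys _ (PySem.Dict.nodup_keys_counter q) 0]
  simp [PySem.Dict.keys_counter, PySem.Dict.getD_counter, goodb, List.all_eq,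
    PySem.Set.mem_ofList]
  constructor
  · intro h x hx; exact_mod_cast h x hx
  · intro h x hx; exact_mod_cast h x hx

lemma singles_zero_iff (q : List Int) : singlesOf q = 0 ↔ goodb q = true := by
  simp only [singlesOf, goodb, Nat.cast_eq_zero, Finset.card_eq_zero,
    Finset.filter_eq_empty_iff, List.mem_toFinset, decide_eq_true_eq]
  constructor
  · intro h x hx
    have := h hx
    have hp : 0 < q.count x := List.count_pos_iff.mpr hx
    omega
  · intro h x hx
    have := h x hx; omega

lemma counter_snoc (p : List Int) (x : Int) :
    (PySem.Dict.counter p).insert x ((p.count x : Int) + 1)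
      = PySem.Dict.counter (p ++ [x]) := by
  rw [← PySem.Dict.getD_counter p x,
      ← PySem.Dict.foldl_insert_getD_add_one_eq_counter,
      ← PySem.Dict.foldl_insert_getD_add_one_eq_counter, List.foldl_append]
  simp

lemma singles_snoc (p : List Int) (x : Int) :
    singlesOf (p ++ [x])
      = (if ((p.count x : Int) + 1) = 1 then singlesOf p + 1
         else if ((p.count x : Int) + 1) = 2 then singlesOf p - 1 else singlesOf p) := by
  have hs : (p ++ [x]).toFinset = insert x p.toFinset := by
    simp [List.toFinset_append]
  have hc : ∀ y, (p ++ [x]).count y = p.count y + (if x = y then 1 else 0) := by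
    intro y; simp [List.count_append, List.count_singleton']
  unfold singlesOf
  rw [hs, Finset.filter_insert]
  by_cases h0 : p.count x = 0
  · -- x new: its count becomes 1, so it joins the filter; other counts unchanged
    have hx : x ∉ p.toFinset := by
      simp [List.mem_toFinset]; exact List.count_eq_zero.mp h0
    have hfc : (Finset.filter (fun y => (p ++ [x]).count y = 1) p.toFinset)
        = Finset.filter (fun y => p.count y = 1) p.toFinset := by
      apply Finset.filter_congr
      intro y hy
      have hne : x ≠ y := by
        intro e; exact hx (e ▸ hy)
      simp [hc y, hne]
    rw [if_pos (by simp [h0]), hfc,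
        Finset.card_insert_of_notMem (fun h => hx (Finset.mem_of_mem_filter _ h))]
    simp [h0]
  · have hxm : x ∈ p := by
      have := List.count_pos_iff.mp (Nat.pos_of_ne_zero h0); exact this
    have hxs : x ∈ p.toFinset := List.mem_toFinset.mpr hxm
    rw [if_neg (by simp [hc x]; omega)]
    by_cases h1 : p.count x = 1
    · -- x's count goes 1 → 2: it leaves the filter
      have : (Finset.filter (fun y => (p ++ [x]).count y = 1) p.toFinset)
          = (Finset.filter (fun y => p.count y = 1) p.toFinset).erase x := by
        ext y
        by_cases hxy : x = y
        · subst hxy; simp [h0]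
        · simp [hxy, Finset.mem_erase]
          exact fun _ _ e => hxy e.symm
      rw [this, Finset.card_erase_of_mem (Finset.mem_filter.mpr ⟨hxs, h1⟩)]
      have hpos : 0 < (Finset.filter (fun y => p.count y = 1) p.toFinset).card :=
        Finset.card_pos.mpr ⟨x, Finset.mem_filter.mpr ⟨hxs, h1⟩⟩
      simp [h1]
      omega
    · -- x's count was already ≥ 2: the filter is unchanged
      have : (Finset.filter (fun y => (p ++ [x]).count y = 1) p.toFinset)
          = Finset.filter (fun y => p.count y = 1) p.toFinset := by
        apply Finset.filter_congr
        intro y hy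
        by_cases hxy : x = y
        · subst hxy; simp [hc x]; omega
        · simp [hc y, hxy]
      rw [this]
      have hne1 : ¬ ((p.count x : Int) + 1 = 1) := by omega
      have hne2 : ¬ ((p.count x : Int) + 1 = 2) := by omega
      simp [hne1, hne2]

lemma bstep_eq (p : List Int) (total : Int) (x : Int) :
    bstep (total, PySem.Dict.counter p, singlesOf p) x
      = ((if goodb (p ++ [x]) then total + 1 else total),
          PySem.Dict.counter (p ++ [x]), singlesOf (p ++ [x])) := by
  simp only [bstep, PySem.Dict.getD_counter]
  rw [counter_snoc, ← singles_snoc p x]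
  congr 1
  by_cases hg : goodb (p ++ [x]) = true
  · rw [if_pos ((singles_zero_iff _).mpr hg), if_pos hg]
  · rw [if_neg (fun h => hg ((singles_zero_iff _).mp h)), if_neg hg]

lemma B_inner (rest : List Int) : ∀ (p : List Int) (total : Int),
    (rest.foldl bstep (total, PySem.Dict.counter p, singlesOf p)).1
      = total + countGood p rest := by
  induction rest with
  | nil => intro p total; simp [countGood]
  | cons x t ih =>
    intro p total
    rw [List.foldl_cons, bstep_eq, ih (p ++ [x]), countGood]
    by_cases hg : goodb (p ++ [x]) = true
    · simp [hg]; ring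
    · simp [hg]

lemma A_inner (l : List Int) : ∀ (p : List Int) (acc : Int),
    (List.range l.length).foldl
      (fun c k => if goodb (p ++ l.take (k + 1)) then c + 1 else c) acc
    = acc + countGood p l := by
  induction l with
  | nil => intro p acc; simp [countGood]
  | cons x t ih =>
    intro p acc
    rw [List.length_cons, List.range_succ_eq_map, List.foldl_cons, List.foldl_map]
    have hfun : (fun (c : Int) (k : ℕ) => if goodb (p ++ (x :: t).take (k.succ + 1)) then c + 1 else c)
        = (fun (c : Int) (k : ℕ) => if goodb ((p ++ [x]) ++ t.take (k + 1)) then c + 1 else c) := by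
      funext c k
      simp [List.take_succ_cons, Nat.succ_eq_add_one]
    rw [hfun, ih (p ++ [x])]
    rw [countGood]
    simp only [List.take_succ_cons, List.take_zero]
    by_cases hg : goodb (p ++ [x]) = true
    · simp [hg]; ring
    · simp [hg]

-- the A-side inner loop equals count + countGood [] (arr.drop i.toNat)
lemma A_inner_at (arr : List Int) (i : Int) (hi0 : 0 ≤ i) (count : Int) :
    (PySem.List.pyRange (i + 1) ((arr.length : Int) + 1) 1).foldl (fun count n =>
        let sub := PySem.Dict.counter (PySem.List.slice arr (some i) (some n))
        let flag := sub.values.all (fun element => !(element < 2))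
        if flag then count + 1 else count) count
      = count + countGood [] (arr.drop i.toNat) := by
  rw [PySem.List.pyRange_one, List.foldl_map]
  have hlen : ((arr.length : Int) + 1 - (i + 1)).toNat = (arr.drop i.toNat).length := by
    rw [List.length_drop]; omega
  have hfun : (fun (c : Int) (k : ℕ) =>
        let sub := PySem.Dict.counter (PySem.List.slice arr (some i) (some (i + 1 + (k : Int))))
        let flag := sub.values.all (fun element => !(element < 2))
        if flag then c + 1 else c)
      = (fun (c : Int) (k : ℕ) =>
          if goodb ([] ++ (arr.drop i.toNat).take (k + 1)) then c + 1 else c) := by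
    funext c k
    have hsl : PySem.List.slice arr (some i) (some (i + 1 + (k : Int)))
        = (arr.drop i.toNat).take (k + 1) := by
      rw [PySem.List.slice_toNat arr hi0 (by omega)]
      congr 1
      omega
    simp only [hsl, goodA_eq_goodb, List.nil_append]
    rfl
  rw [hlen, hfun, A_inner]

-- ===== VERDICT (by name: the statement is the Claim_ definition above) =====
theorem duplicatesOnSegment_1_spec : Claim_equal_duplicatesOnSegment_1 := by
  intro arr _
  unfold Spec_duplicatesOnSegment_1 duplicatesOnSegment_1 duplicatesOnSegment_1_alt
  apply PySem.List.foldl_congr_mem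
  intro count i hi
  have hi0 : 0 ≤ i := ((PySem.List.mem_pyRange_one).mp hi).1
  rw [A_inner_at arr i hi0 count]
  have hB : (fun (st : Int × PySem.Dict Int Int × Int) j =>
        let x := PySem.List.pyGetD arr j 0
        let c := st.2.1.getD x 0 + 1
        let cnt := st.2.1.insert x c
        let singles := if c = 1 then st.2.2 + 1 else if c = 2 then st.2.2 - 1 else st.2.2
        let total := if singles = 0 then st.1 + 1 else st.1
        (total, cnt, singles))
      = (fun st j => bstep st (PySem.List.pyGetD arr j 0)) := rfl
  rw [hB, PySem.List.foldl_pyRange_pyGetD' arr 0 bstep (count, PySem.Dict.empty, 0) hi0]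
  have hinit : ((count, PySem.Dict.empty, (0 : Int)) : Int × PySem.Dict Int Int × Int)
      = (count, PySem.Dict.counter [], singlesOf []) := by
    simp [singlesOf]; rfl
  rw [hinit, B_inner (arr.drop i.toNat) [] count]
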